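-- pv_equiv track=rewrite | github.com/nathanielhobbs/geometric_ensembles | utils.py | create_length_index_dict
-- ===== SOURCE A (Python) =====
-- def create_length_index_dict(string_list):
--     """Map sentence length (word count) to list of indices with that length."""
--     length_index_dict = {}
--     for index, string in enumerate(string_list):
--         length = len(string.split())
--         if length not in length_index_dict:
--             length_index_dict[length] = []
--         length_index_dict[length].append(index)
--     return length_index_dict
-- ===== SOURCE B (Python) =====
-- def create_length_index_dict(string_list):
--     """Map sentence length (word count) to list of indices with that length."""
--     lengths = [len(s.split()) for s in string_list]
--     return {
--         length: [i for i, x in enumerate(lengths) if x == length]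
--         for length in dict.fromkeys(lengths)
--     }
-- ===== Notes on version B (the rewrite author's own statement) =====
-- stated objective: alternative
-- what changed: B replaces the single-pass dict-bucketing loop by a two-phase comprehension: it precomputes all word counts, dedups them in first-appearance order with dict.fromkeys, and builds each bucket by scanning the length list per distinct key.
import Mathlib
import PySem

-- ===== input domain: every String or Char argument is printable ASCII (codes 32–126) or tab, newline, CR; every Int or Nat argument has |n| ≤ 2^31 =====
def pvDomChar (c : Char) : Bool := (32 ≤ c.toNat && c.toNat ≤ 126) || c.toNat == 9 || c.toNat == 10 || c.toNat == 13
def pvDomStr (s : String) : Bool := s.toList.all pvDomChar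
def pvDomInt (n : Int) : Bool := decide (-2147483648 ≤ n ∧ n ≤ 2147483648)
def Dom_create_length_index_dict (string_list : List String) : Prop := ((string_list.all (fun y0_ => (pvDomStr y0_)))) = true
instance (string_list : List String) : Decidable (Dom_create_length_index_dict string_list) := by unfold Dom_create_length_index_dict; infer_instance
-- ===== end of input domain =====

-- B groups indices by word count in two phases (dedup the precomputed length list,
-- then one scan per distinct length) instead of A's single-pass dict bucketing;
-- same return value, no speed claim (objective: alternative).

-- ===== PORT A =====
def create_length_index_dict (string_list : List String) : List (Int × List Int) :=
  ((PySem.List.enumerate string_list).foldl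
    (fun d p =>
      let length : Int := (PySem.Str.split₀ p.2).length
      let d' := if d.contains length then d else d.insert length ([] : List Int)
      d'.modify length [] (fun v => v ++ [p.1]))
    PySem.Dict.empty).items

-- ===== PORT B =====
def create_length_index_dict_alt (string_list : List String) : List (Int × List Int) :=
  let lengths : List Int := string_list.map (fun s => ((PySem.Str.split₀ s).length : Int))
  (PySem.List.dedup lengths).map (fun length =>
    (length, ((PySem.List.enumerate lengths).filter (fun p => p.2 == length)).map (fun p => p.1)))

-- ===== PRECONDITION & SPEC =====
def Spec_create_length_index_dict (string_list : List String) (out : List (Int × List Int)) : Prop := out = create_length_index_dict_alt string_list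
instance (string_list : List String) (out : List (Int × List Int)) : Decidable (Spec_create_length_index_dict string_list out) := by unfold Spec_create_length_index_dict; infer_instance

-- ===== CLAIM (what is proved, stated in full; the proofs are below) =====
def Claim_equal_create_length_index_dict : Prop := ∀ (string_list : List String), Dom_create_length_index_dict string_list → Spec_create_length_index_dict string_list (create_length_index_dict string_list)

-- ===== LEMMAS AND PROOFS =====

-- A's "if missing then d[L]=[]; d[L].append(i)" is one modify step.
theorem pv_step_eq (d : PySem.Dict Int (List Int)) (k : Int) (g : List Int → List Int) :
    (if d.contains k then d else d.insert k ([] : List Int)).modify k [] g = d.modify k [] g := by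
  by_cases h : d.contains k
  · simp [h]
  · have hc : d.contains k = false := by simpa using h
    simp only [hc, Bool.false_eq_true, if_false, PySem.Dict.modify,
      PySem.Dict.getD_insert_self, PySem.Dict.insert_insert_self,
      PySem.Dict.getD_of_not_contains d ([] : List Int) hc]

-- enumerate commutes with map on the elements
theorem pv_enumerate_map {α β : Type} (f : α → β) (xs : List α) (s : Int) :
    PySem.List.enumerate (xs.map f) s
      = (PySem.List.enumerate xs s).map (fun p => (p.1, f p.2)) := by
  induction xs generalizing s with
  | nil => simp [PySem.List.enumerate]
  | cons x xs ih => simp [PySem.List.enumerate_cons, ih]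

theorem create_length_index_dict_eq (string_list : List String) :
    create_length_index_dict string_list = create_length_index_dict_alt string_list := by
  have hbody : ∀ (e : List (Int × String)) (d : PySem.Dict Int (List Int)),
      e.foldl
        (fun d p =>
          let length : Int := (PySem.Str.split₀ p.2).length
          let d' := if d.contains length then d else d.insert length ([] : List Int)
          d'.modify length [] (fun v => v ++ [p.1])) d
        = (e.map (fun p => (((PySem.Str.split₀ p.2).length : Int), p.1))).foldl
            (fun d p => d.modify p.1 [] (fun v => v ++ [p.2])) d := by
    intro e d
    rw [List.foldl_map]
    congr 1
    funext d p
    exact pv_step_eq d _ _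
  unfold create_length_index_dict create_length_index_dict_alt
  rw [hbody]
  -- name the swapped pair list and the resulting dict
  generalize hE : PySem.List.enumerate string_list = e
  have hsnd : e.map (fun p => p.2) = string_list := by
    rw [← hE]; exact PySem.List.map_snd_enumerate string_list 0
  have hfst : (e.map (fun p => (((PySem.Str.split₀ p.2).length : Int), p.1))).map (fun p => p.1)
      = string_list.map (fun s => ((PySem.Str.split₀ s).length : Int)) := by
    rw [List.map_map, ← hsnd, List.map_map]
    rfl
  have hkeys : ((e.map (fun p => (((PySem.Str.split₀ p.2).length : Int), p.1))).foldl
      (fun d p => d.modify p.1 [] (fun v => v ++ [p.2])) PySem.Dict.empty).keys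
      = PySem.List.dedup (string_list.map (fun s => ((PySem.Str.split₀ s).length : Int))) := by
    rw [PySem.Dict.keys_foldl_modify_key
      (e.map (fun p => (((PySem.Str.split₀ p.2).length : Int), p.1)))
      (fun p : Int × Int => p.1) ([] : List Int)
      (fun (_ : PySem.Dict Int (List Int)) (p : Int × Int) => fun v => v ++ [p.2])
      PySem.Dict.empty, hfst]
    simp only [PySem.List.dedup_eq_ofList]
    rfl
  have hnodup := hkeys ▸ PySem.List.nodup_dedup
    (string_list.map (fun s => ((PySem.Str.split₀ s).length : Int)))
  rw [PySem.Dict.items_eq_map_keys _ hnodup ([] : List Int), hkeys]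
  simp only []
  refine List.map_congr_left (fun k _ => ?_)
  rw [PySem.Dict.getD_foldl_modify_append, PySem.Dict.getD_empty]
  rw [pv_enumerate_map (fun s => ((PySem.Str.split₀ s).length : Int)) string_list 0, hE]
  simp [List.filter_map, List.map_map, Function.comp_def]

-- ===== VERDICT (by name: the statement is the Claim_ definition above) =====
theorem create_length_index_dict_spec : Claim_equal_create_length_index_dict := by
  intro string_list _
  unfold Spec_create_length_index_dict
  exact create_length_index_dict_eq string_list
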